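-- pv_equiv track=rewrite | github.com/PetryakovALeks/first_repo | Python File.py | sum_na
-- ===== SOURCE A (Python) =====
-- def sum_na(number):
--     """Вычисляет сумму цифр числа, делящихся на 3."""
--     summa = 0
--     number_str = str(abs(number))
--     for di in number_str:
--         di_int = int(di)
--         if di_int % 3 == 0:
--             summa += di_int
--     return summa
-- ===== SOURCE B (Python) =====
-- def sum_na(number):
--     """Вычисляет сумму цифр числа, делящихся на 3."""
--     summa = 0
--     n = abs(number)
--     while n > 0:
--         d = n % 10
--         if d % 3 == 0:
--             summa += d
--         n //= 10
--     return summa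
-- ===== Notes on version B (the rewrite author's own statement) =====
-- stated objective: idiomatic
-- what changed: B extracts digits arithmetically with repeated modulo and floor division in a while loop instead of converting the number to a string and re-parsing each character with int().
import Mathlib
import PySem

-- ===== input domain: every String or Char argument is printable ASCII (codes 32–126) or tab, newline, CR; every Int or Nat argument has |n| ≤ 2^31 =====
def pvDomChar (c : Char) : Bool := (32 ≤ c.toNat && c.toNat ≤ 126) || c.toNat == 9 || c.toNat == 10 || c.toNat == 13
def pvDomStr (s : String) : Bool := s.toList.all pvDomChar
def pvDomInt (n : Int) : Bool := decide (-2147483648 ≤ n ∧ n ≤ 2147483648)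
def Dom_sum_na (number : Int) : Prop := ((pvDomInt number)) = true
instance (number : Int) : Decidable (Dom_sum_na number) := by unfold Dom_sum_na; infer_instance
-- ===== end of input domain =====

-- B replaces A's string conversion and per-character int() parsing by arithmetic digit
-- extraction (repeated modulo and floor division); the two digit sums are proved equal on every Int.

-- ===== PORT A =====
-- loop body of A: di_int = int(di); if di_int % 3 == 0: summa += di_int
def pvStepA (summa : Int) (di : Char) : Int :=
  -- int(di); di is always a decimal digit character of str(abs(number)), so the
  -- parse succeeds and the .getD default is unreachable
  let di_int : Int := (PySem.Int.ofStr? (String.mk [di])).getD 0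
  if PySem.Int.mod di_int 3 = 0 then summa + di_int else summa

def sum_na (number : Int) : Int :=
  -- number_str = str(abs(number)); for di in number_str: …
  ((PySem.Int.toStr |number|).toList).foldl pvStepA 0

-- ===== PORT B =====
-- while n > 0: d = n % 10; if d % 3 == 0: summa += d; n //= 10
def pvLoopB (n : Nat) (summa : Int) : Int :=
  if n = 0 then summa
  else pvLoopB (n / 10) (if n % 10 % 3 = 0 then summa + ((n % 10 : Nat) : Int) else summa)
termination_by n
decreasing_by exact Nat.div_lt_self (Nat.pos_of_ne_zero (by assumption)) (by norm_num)

def sum_na_alt (number : Int) : Int :=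
  pvLoopB number.natAbs 0

-- ===== PRECONDITION & SPEC =====
def Spec_sum_na (number : Int) (out : Int) : Prop := out = sum_na_alt number
instance (number : Int) (out : Int) : Decidable (Spec_sum_na number out) := by unfold Spec_sum_na; infer_instance

-- ===== CLAIM (what is proved, stated in full; the proofs are below) =====
def Claim_equal_sum_na : Prop := ∀ (number : Int), Dom_sum_na number → Spec_sum_na number (sum_na number)

-- ===== LEMMAS AND PROOFS =====

lemma pvDigitVal (r : Nat) (hr : r < 10) :
    PySem.Int.ofStr? (String.mk [Nat.digitChar r]) = some (r : Int) := by
  interval_cases r <;> decide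

lemma pvStepA_digit (s : Int) (r : Nat) (hr : r < 10) :
    pvStepA s (Nat.digitChar r) = s + (if r % 3 = 0 then (r : Int) else 0) := by
  simp only [pvStepA, pvDigitVal r hr, Option.getD_some]
  rw [show (3 : Int) = ((3 : Nat) : Int) by norm_cast, PySem.Int.mod_natCast]
  simp only [Nat.cast_eq_zero]
  split_ifs <;> ring

lemma pvLoopB_zero (s : Int) : pvLoopB 0 s = s := by
  rw [pvLoopB]; simp

lemma pvLoopB_add (n : Nat) : ∀ s : Int, pvLoopB n s = s + pvLoopB n 0 := by
  induction n using Nat.strong_induction_on with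
  | _ n ih =>
    intro s
    by_cases h : n = 0
    · subst h; rw [pvLoopB_zero, pvLoopB_zero]; ring
    · have hlt : n / 10 < n := Nat.div_lt_self (Nat.pos_of_ne_zero h) (by norm_num)
      rw [pvLoopB, if_neg h, ih _ hlt]
      conv_rhs => rw [pvLoopB, if_neg h, ih _ hlt]
      split_ifs <;> ring

lemma toDigitsCore_succ (b fuel n : Nat) (ds : List Char) :
    Nat.toDigitsCore b (fuel + 1) n ds =
      if n / b = 0 then Nat.digitChar (n % b) :: ds
      else Nat.toDigitsCore b fuel (n / b) (Nat.digitChar (n % b) :: ds) := rfl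

set_option maxHeartbeats 1000000 in
lemma toDigitsCore_foldl (fuel : Nat) : ∀ (n : Nat) (ds : List Char) (s : Int), n ≤ fuel →
    (Nat.toDigitsCore 10 (fuel + 1) n ds).foldl pvStepA s = ds.foldl pvStepA (s + pvLoopB n 0) := by
  induction fuel with
  | zero =>
    intro n ds s hn
    interval_cases n
    rw [toDigitsCore_succ]
    show (Nat.digitChar 0 :: ds).foldl pvStepA s = ds.foldl pvStepA (s + pvLoopB 0 0)
    rw [List.foldl_cons, pvStepA_digit s 0 (by norm_num), pvLoopB_zero]
    norm_num
  | succ fuel ih =>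
    intro n ds s hn
    rw [toDigitsCore_succ]
    have hd := pvStepA_digit s (n % 10) (Nat.mod_lt n (by norm_num))
    by_cases h0 : n / 10 = 0
    · -- last digit emitted, loop ends
      rw [if_pos h0, List.foldl_cons, hd]
      congr 1
      by_cases hn0 : n = 0
      · subst hn0; rw [pvLoopB_zero]; norm_num
      · rw [pvLoopB, if_neg hn0, h0, pvLoopB_zero]
        split_ifs <;> ring
    · have hnpos : n ≠ 0 := by intro h; subst h; simp at h0
      have hle : n / 10 ≤ fuel := by
        have := Nat.div_lt_self (Nat.pos_of_ne_zero hnpos) (show 1 < 10 by norm_num)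
        omega
      rw [if_neg h0, ih (n / 10) (Nat.digitChar (n % 10) :: ds) s hle, List.foldl_cons,
        pvStepA_digit _ (n % 10) (Nat.mod_lt n (by norm_num))]
      congr 1
      conv_rhs => rw [pvLoopB, if_neg hnpos]
      split_ifs with hc
      · conv_rhs => rw [pvLoopB_add (n / 10)]
        ring
      · ring

lemma sum_na_eq_loop (m : Nat) :
    ((PySem.Int.toStr (m : Int)).toList).foldl pvStepA 0 = pvLoopB m 0 := by
  rw [PySem.Int.toList_toStr]
  have h1 : ¬ ((m : Int) < 0) := Int.not_lt.mpr (Int.natCast_nonneg m)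
  show (PySem.Int.toChars (m : Int)).foldl pvStepA 0 = pvLoopB m 0
  unfold PySem.Int.toChars
  rw [if_neg h1, Int.toNat_natCast, Nat.toDigits]
  have := toDigitsCore_foldl m m [] 0 le_rfl
  simpa using this

-- ===== VERDICT (by name: the statement is the Claim_ definition above) =====
theorem sum_na_spec : Claim_equal_sum_na := by
  intro number _
  show sum_na number = sum_na_alt number
  unfold sum_na sum_na_alt
  rw [Int.abs_eq_natAbs number, sum_na_eq_loop]
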